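-- pv_equiv track=rewrite | github.com/TheodoreAD/exercise--simple-payment-service | src/simple_payment_service/payment.py | validate_card_holder_name_upper
-- ===== SOURCE A (Python) =====
-- from typing import Dict, Any, Optional, Tuple, List
--
-- def validate_card_holder_name_upper(value: str) -> Tuple[bool, str]:
--     if not 2 <= len(value) <= 40:
--         return False, "Invalid name length."
--
--     for c in value:
--         ordinal = ord(c)
--         if not (ordinal == 32 or 65 <= ordinal <= 90):
--             return False, "Invalid characters in name, expected ASCII letters or space."
--
--     return True, ""
-- ===== SOURCE B (Python) =====
-- def validate_card_holder_name_upper(value):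
--     if not 2 <= len(value) <= 40:
--         return False, "Invalid name length."
--     letters = value.replace(" ", "")
--     if letters == "" or (letters.isalpha() and letters == letters.upper()):
--         return True, ""
--     return False, "Invalid characters in name, expected ASCII letters or space."
-- ===== Notes on version B (the rewrite author's own statement) =====
-- stated objective: idiomatic
-- what changed: B normalizes first (strips spaces with str.replace) and then validates the remainder with the library predicates isalpha plus an upper-case fixed-point test, instead of A's per-character early-exit loop over ord ranges.
import Mathlib
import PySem

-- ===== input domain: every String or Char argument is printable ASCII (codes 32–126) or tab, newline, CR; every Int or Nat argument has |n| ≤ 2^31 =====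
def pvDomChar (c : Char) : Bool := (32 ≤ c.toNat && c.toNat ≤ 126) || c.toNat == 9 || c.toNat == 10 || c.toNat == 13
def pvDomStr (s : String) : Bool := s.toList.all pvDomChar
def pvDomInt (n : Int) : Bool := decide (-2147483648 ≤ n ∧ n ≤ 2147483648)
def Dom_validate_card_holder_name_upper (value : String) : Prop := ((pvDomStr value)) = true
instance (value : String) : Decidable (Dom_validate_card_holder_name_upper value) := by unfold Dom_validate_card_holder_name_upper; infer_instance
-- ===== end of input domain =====

-- B normalizes first (strip spaces via replace) and then checks the remainder with the
-- library predicates isalpha + upper-case fixed point, instead of A's per-char ord-range loop.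

-- ===== PORT A =====
-- the for-loop over the characters, with its early return
def pvLoopA : List Char → Bool × String
  | [] => (true, "")
  | c :: rest =>
      let ordinal := c.toNat
      if ¬(ordinal = 32 ∨ (65 ≤ ordinal ∧ ordinal ≤ 90)) then
        (false, "Invalid characters in name, expected ASCII letters or space.")
      else pvLoopA rest

def validate_card_holder_name_upper (value : String) : Bool × String :=
  if ¬(2 ≤ PySem.Str.len value ∧ PySem.Str.len value ≤ 40) then
    (false, "Invalid name length.")
  else
    pvLoopA value.toList

-- ===== PORT B =====
def validate_card_holder_name_upper_alt (value : String) : Bool × String :=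
  if ¬(2 ≤ PySem.Str.len value ∧ PySem.Str.len value ≤ 40) then
    (false, "Invalid name length.")
  else
    let letters := PySem.Str.replace value " " ""
    if letters = "" ∨ (PySem.Str.strIsalpha letters = true ∧ letters = PySem.Str.upper letters) then
      (true, "")
    else
      (false, "Invalid characters in name, expected ASCII letters or space.")

-- ===== PRECONDITION & SPEC =====
def Spec_validate_card_holder_name_upper (value : String) (out : Bool × String) : Prop := out = validate_card_holder_name_upper_alt value
instance (value : String) (out : Bool × String) : Decidable (Spec_validate_card_holder_name_upper value out) := by unfold Spec_validate_card_holder_name_upper; infer_instance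

-- ===== CLAIM (what is proved, stated in full; the proofs are below) =====
def Claim_equal_validate_card_holder_name_upper : Prop := ∀ (value : String), Dom_validate_card_holder_name_upper value → Spec_validate_card_holder_name_upper value (validate_card_holder_name_upper value)

-- ===== LEMMAS AND PROOFS =====
theorem pvLoopA_eq (cs : List Char) :
    pvLoopA cs =
      if ∀ c ∈ cs, (c.toNat = 32 ∨ (65 ≤ c.toNat ∧ c.toNat ≤ 90)) then (true, "")
      else (false, "Invalid characters in name, expected ASCII letters or space.") := by
  induction cs with
  | nil => simp [pvLoopA]
  | cons c rest ih =>
    simp only [pvLoopA, ih]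
    split_ifs with h1 h2 h3 <;> simp_all

-- value.replace(" ", "") just filters the spaces out
theorem pvGo_filter (fuel : Nat) (l acc : List Char) (h : l.length ≤ fuel) :
    PySem.Chars.replace.go [' '] [] fuel l acc = acc.reverse ++ l.filter (· ≠ ' ') := by
  induction fuel generalizing l acc with
  | zero =>
    have : l = [] := List.length_eq_zero_iff.mp (Nat.le_zero.mp h)
    subst this; simp [PySem.Chars.replace.go]
  | succ n ih =>
    cases l with
    | nil => simp [PySem.Chars.replace.go]
    | cons c t =>
      simp only [PySem.Chars.replace.go]
      by_cases hc : c = ' '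
      · subst hc
        simp only [List.isPrefixOf, BEq.rfl, Bool.true_and, if_pos,
          List.length_cons, List.length_nil, List.drop_succ_cons, List.drop_zero,
          List.reverse_nil, List.nil_append]
        rw [ih t acc (by simpa using h)]
        simp
      · have : List.isPrefixOf [' '] (c :: t) = false := by
          simp [List.isPrefixOf]; exact fun hcc => absurd hcc.symm hc
        rw [if_neg (by simp [this])]
        rw [ih t (c :: acc) (by simpa using h)]
        simp [hc]

theorem pvReplace_filter (cs : List Char) :
    PySem.Chars.replace cs [' '] [] = cs.filter (· ≠ ' ') := by
  simp only [PySem.Chars.replace]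
  rw [if_neg (by simp)]
  simpa using pvGo_filter cs.length cs [] le_rfl

-- per-character: 'alpha and equal to its upper' is exactly 'ASCII upper-case letter'
theorem pvChar_upper_iff (c : Char) :
    (PySem.Chars.isalpha c = true ∧ PySem.Chars.upperChar c = c) ↔ (65 ≤ c.toNat ∧ c.toNat ≤ 90) := by
  have hA : ('A' ≤ c) ↔ 65 ≤ c.toNat := by
    rw [Char.le_def, UInt32.le_iff_toNat_le]; exact Iff.rfl
  have hZ : (c ≤ 'Z') ↔ c.toNat ≤ 90 := by
    rw [Char.le_def, UInt32.le_iff_toNat_le]; exact Iff.rfl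
  have ha : ('a' ≤ c) ↔ 97 ≤ c.toNat := by
    rw [Char.le_def, UInt32.le_iff_toNat_le]; exact Iff.rfl
  have hz : (c ≤ 'z') ↔ c.toNat ≤ 122 := by
    rw [Char.le_def, UInt32.le_iff_toNat_le]; exact Iff.rfl
  by_cases hl : PySem.Chars.islower c = true
  · have hlo : 97 ≤ c.toNat ∧ c.toNat ≤ 122 := by
      simp only [PySem.Chars.islower, Bool.and_eq_true, decide_eq_true_eq] at hl
      exact ⟨ha.mp hl.1, hz.mp hl.2⟩
    have hne : PySem.Chars.upperChar c ≠ c := by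
      simp only [PySem.Chars.upperChar, if_pos hl]
      intro hEq
      have := congrArg Char.toNat hEq
      rw [Char.toNat_ofNat, if_pos (by left; omega : (c.toNat - 32).isValidChar)] at this
      omega
    constructor
    · rintro ⟨_, h2⟩; exact absurd h2 hne
    · intro h; omega
  · simp only [PySem.Chars.isalpha, PySem.Chars.isupper, hl, Bool.or_false,
      PySem.Chars.upperChar, Bool.and_eq_true, decide_eq_true_eq]
    constructor
    · rintro ⟨⟨h1, h2⟩, _⟩; exact ⟨hA.mp h1, hZ.mp h2⟩
    · intro h; exact ⟨⟨hA.mpr h.1, hZ.mpr h.2⟩, rfl⟩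

theorem pvSpace_iff (c : Char) : c = ' ' ↔ c.toNat = 32 := by
  constructor
  · intro h; subst h; decide
  · intro h
    have := Char.ofNat_toNat c
    rw [h] at this; exact this.symm

theorem pvMap_self_iff {f : Char → Char} {l : List Char} :
    l.map f = l ↔ ∀ x ∈ l, f x = x := by
  induction l with
  | nil => simp
  | cons a t ih => simp_all [List.map_cons]

-- the two validity conditions coincide
theorem pvCond_iff (cs : List Char) :
    (cs.filter (· ≠ ' ') = [] ∨
      (PySem.Chars.strIsalpha (cs.filter (· ≠ ' ')) = true ∧
        cs.filter (· ≠ ' ') = PySem.Chars.upper (cs.filter (· ≠ ' ')))) ↔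
      ∀ c ∈ cs, (c.toNat = 32 ∨ (65 ≤ c.toNat ∧ c.toNat ≤ 90)) := by
  set ls := cs.filter (· ≠ ' ') with hls
  have hmem : ∀ c, c ∈ ls ↔ (c ∈ cs ∧ c ≠ ' ') := by
    intro c; simp [hls]
  have hstep : (ls = [] ∨ (PySem.Chars.strIsalpha ls = true ∧ ls = PySem.Chars.upper ls)) ↔
      ∀ c ∈ ls, (65 ≤ c.toNat ∧ c.toNat ≤ 90) := by
    rcases List.eq_nil_or_concat ls with hnil | ⟨l', a, hcons⟩
    · simp [hnil]
    · have hne : ls ≠ [] := by rw [hcons]; simp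
      constructor
      · rintro (h | ⟨h1, h2⟩)
        · exact absurd h hne
        · intro c hc
          simp only [PySem.Chars.strIsalpha, Bool.and_eq_true, List.all_eq_true] at h1
          have halpha := h1.2 c hc
          have hup : PySem.Chars.upperChar c = c := by
            simp only [PySem.Chars.upper] at h2
            exact (pvMap_self_iff.mp h2.symm) c hc
          exact (pvChar_upper_iff c).mp ⟨halpha, hup⟩
      · intro h
        right
        constructor
        · simp only [PySem.Chars.strIsalpha, Bool.and_eq_true, List.all_eq_true]
          refine ⟨by simpa [List.isEmpty_iff] using hne, fun c hc => ?_⟩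
          exact ((pvChar_upper_iff c).mpr (h c hc)).1
        · simp only [PySem.Chars.upper]
          exact (pvMap_self_iff.mpr (fun c hc => ((pvChar_upper_iff c).mpr (h c hc)).2)).symm
  rw [hstep]
  constructor
  · intro h c hc
    by_cases hsp : c = ' '
    · left; exact (pvSpace_iff c).mp hsp
    · right; exact h c ((hmem c).mpr ⟨hc, hsp⟩)
  · intro h c hc
    rcases (hmem c).mp hc with ⟨hccs, hsp⟩
    rcases h c hccs with h32 | hUp
    · exact absurd ((pvSpace_iff c).mpr h32) hsp
    · exact hUp

theorem pvString_toList_inj {a b : String} (h : a.toList = b.toList) : a = b :=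
  String.toList_inj.mp h

-- ===== VERDICT (by name: the statement is the Claim_ definition above) =====
theorem validate_card_holder_name_upper_spec : Claim_equal_validate_card_holder_name_upper := by
  intro value _
  unfold Spec_validate_card_holder_name_upper validate_card_holder_name_upper validate_card_holder_name_upper_alt
  by_cases hlen : 2 ≤ PySem.Str.len value ∧ PySem.Str.len value ≤ 40
  · rw [if_neg (not_not_intro hlen), if_neg (not_not_intro hlen), pvLoopA_eq]
    have hrep : (PySem.Str.replace value " " "").toList = value.toList.filter (· ≠ ' ') := by
      rw [PySem.Str.toList_replace]
      simpa using pvReplace_filter value.toList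
    have hcond : (PySem.Str.replace value " " "" = "" ∨
        (PySem.Str.strIsalpha (PySem.Str.replace value " " "") = true ∧
          PySem.Str.replace value " " "" = PySem.Str.upper (PySem.Str.replace value " " ""))) ↔
        ∀ c ∈ value.toList, (c.toNat = 32 ∨ (65 ≤ c.toNat ∧ c.toNat ≤ 90)) := by
      rw [← pvCond_iff]
      constructor
      · rintro (h | ⟨h1, h2⟩)
        · left; rw [← hrep, h]; rfl
        · right
          refine ⟨?_, ?_⟩
          · rw [← hrep]; simpa [PySem.Str.strIsalpha] using h1
          · rw [← hrep]
            have := congrArg String.toList h2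
            rw [PySem.Str.toList_upper] at this
            exact this
      · rintro (h | ⟨h1, h2⟩)
        · left
          apply pvString_toList_inj
          rw [hrep, h]; rfl
        · right
          refine ⟨by rw [← hrep] at h1; simpa [PySem.Str.strIsalpha] using h1, ?_⟩
          apply pvString_toList_inj
          rw [PySem.Str.toList_upper, hrep]
          exact h2
    by_cases hv : ∀ c ∈ value.toList, (c.toNat = 32 ∨ (65 ≤ c.toNat ∧ c.toNat ≤ 90))
    · rw [if_pos hv, if_pos (hcond.mpr hv)]
    · rw [if_neg hv, if_neg (fun h => hv (hcond.mp h))]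
  · rw [if_pos hlen, if_pos hlen]
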